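-- pv_equiv track=rewrite | github.com/popovartem1997/pro_channels | content/tasks.py | _tg_plain_preserve_spaces
-- ===== SOURCE A (Python) =====
-- def _tg_plain_preserve_spaces(plain: str) -> str:
--     """Два пробела → пробел + NBSP; длина в UTF-16 не меняется — смещения entities сохраняются."""
--     s = plain or ''
--     s = s.replace('\r\n', '\n').replace('\r', '\n')
--     lines = s.split('\n')
--     fixed = []
--     for line in lines:
--         while '  ' in line:
--             line = line.replace('  ', ' \u00a0')
--         fixed.append(line)
--     return '\n'.join(fixed)
-- ===== SOURCE B (Python) =====
-- def _tg_plain_preserve_spaces(plain: str) -> str: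
--     """Single left-to-right scan: each maximal run of n ASCII spaces becomes
--     floor(n/2) copies of ' \u00a0' plus a trailing ' ' when n is odd."""
--     s = (plain or '').replace('\r\n', '\n').replace('\r', '\n')
--     out = []
--     i = 0
--     n = len(s)
--     while i < n:
--         c = s[i]
--         if c == ' ':
--             j = i
--             while j < n and s[j] == ' ':
--                 j += 1
--             run = j - i
--             out.append(' \u00a0' * (run // 2) + ' ' * (run % 2))
--             i = j
--         else:
--             out.append(c)
--             i += 1
--     return ''.join(out)
-- ===== Notes on version B (the rewrite author's own statement) =====
-- stated objective: alternative
-- what changed: Instead of splitting on newlines and repeatedly calling str.replace of a double space by space+NBSP in a per-line while loop, B does one left-to-right scan of the whole string that run-length-encodes each maximal run of n spaces as floor(n/2) space+NBSP pairs plus a trailing space when n is odd.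
import Mathlib
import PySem

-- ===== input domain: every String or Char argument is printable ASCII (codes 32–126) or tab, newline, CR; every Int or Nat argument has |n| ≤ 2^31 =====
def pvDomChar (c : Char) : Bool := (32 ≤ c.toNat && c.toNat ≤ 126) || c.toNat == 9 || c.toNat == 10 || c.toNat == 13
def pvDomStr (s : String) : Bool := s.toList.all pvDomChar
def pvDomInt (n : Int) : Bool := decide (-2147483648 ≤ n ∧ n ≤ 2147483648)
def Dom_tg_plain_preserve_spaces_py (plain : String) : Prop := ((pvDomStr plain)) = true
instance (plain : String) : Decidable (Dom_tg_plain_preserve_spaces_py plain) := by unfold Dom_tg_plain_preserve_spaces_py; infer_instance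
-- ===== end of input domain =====

-- B replaces A's split-on-newlines + per-line `while '  ' in line: replace('  ', ' \u00A0')` loop
-- by a single left-to-right scan that run-length-encodes each maximal run of n spaces as n/2
-- copies of " \u00A0" plus a trailing space when n is odd (objective: alternative, same cost).

-- ===== PORT A =====
-- the `while '  ' in line:` loop; fuel is a totality artifact only (the loop leaves no '  '
-- after one replace pass, so fuel = len(line)+1 is always enough — proved in the lemmas below)
def tgA_while : Nat → String → String
  | 0, line => line
  | fuel + 1, line =>
    if PySem.Str.isIn "  " line then
      tgA_while fuel (PySem.Str.replace line "  " " \u00A0")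
    else line

def tg_plain_preserve_spaces_py (plain : String) : String :=
  let s := if plain = "" then "" else plain
  let s := PySem.Str.replace (PySem.Str.replace s "\r\n" "\n") "\r" "\n"
  let lines : List String := (PySem.Str.split? s "\n").getD []   -- sep "\n" ≠ "" so split? is `some`
  let fixed : List String :=
    lines.foldl (fun acc line => acc ++ [tgA_while (line.toList.length + 1) line]) []
  PySem.Str.join "\n" fixed

-- ===== PORT B =====
-- the single scan of Source B: on a space, measure the run, emit its encoding, continue after it
def tgB_go : List Char → List Char
  | [] => []
  | c :: t =>
    if h : c = ' ' then
      let run := ((c :: t).takeWhile (fun x => x == ' ')).length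
      (List.replicate (run / 2) [' ', '\u00A0']).flatten ++ List.replicate (run % 2) ' '
        ++ tgB_go ((c :: t).dropWhile (fun x => x == ' '))
    else
      c :: tgB_go t
termination_by l => l.length
decreasing_by
  · simp only [List.dropWhile_cons, h]
    simp only [beq_self_eq_true, if_true, List.length_cons]
    exact Nat.lt_succ_of_le (List.length_dropWhile_le _ _)
  · simp

def tg_plain_preserve_spaces_py_alt (plain : String) : String :=
  let s := if plain = "" then "" else plain
  let s := PySem.Str.replace (PySem.Str.replace s "\r\n" "\n") "\r" "\n"
  String.ofList (tgB_go s.toList)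

-- ===== PRECONDITION & SPEC =====
def Spec_tg_plain_preserve_spaces_py (plain : String) (out : String) : Prop := out = tg_plain_preserve_spaces_py_alt plain
instance (plain : String) (out : String) : Decidable (Spec_tg_plain_preserve_spaces_py plain out) := by unfold Spec_tg_plain_preserve_spaces_py; infer_instance

-- ===== CLAIM (what is proved, stated in full; the proofs are below) =====
def Claim_equal_tg_plain_preserve_spaces_py : Prop := ∀ (plain : String), Dom_tg_plain_preserve_spaces_py plain → Spec_tg_plain_preserve_spaces_py plain (tg_plain_preserve_spaces_py plain)

-- ===== LEMMAS AND PROOFS =====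

def pvRepl : List Char → List Char
  | ' ' :: ' ' :: t => ' ' :: '\u00A0' :: pvRepl t
  | c :: t => c :: pvRepl t
  | [] => []

theorem pvRepl_cons (c : Char) (t : List Char)
    (h : [' ', ' '].isPrefixOf (c :: t) = false) : pvRepl (c :: t) = c :: pvRepl t := by
  rw [pvRepl.eq_def]
  split
  · rename_i heq
    cases heq
    simp [List.isPrefixOf] at h
  · rename_i heq
    cases heq
    rfl
  · rename_i heq; cases heq

theorem pvRepl_go (l : List Char) : ∀ (fuel : Nat) (acc : List Char), l.length ≤ fuel →
    PySem.Chars.replace.go [' ', ' '] [' ', '\u00A0'] fuel l acc = acc.reverse ++ pvRepl l := by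
  induction l using pvRepl.induct with
  | case1 t ih =>
    intro fuel acc hf
    match fuel with
    | f + 1 =>
      rw [PySem.Chars.replace.go]
      simp only [List.length_cons] at hf
      have hp : [' ', ' '].isPrefixOf (' ' :: ' ' :: t) = true := by simp [List.isPrefixOf]
      simp only [hp, if_true]
      have hd : List.drop [' ', ' '].length (' ' :: ' ' :: t) = t := rfl
      rw [hd, ih f _ (by omega)]
      simp [pvRepl]
  | case2 c t hne ih =>
    intro fuel acc hf
    match fuel with
    | f + 1 =>
      rw [PySem.Chars.replace.go]
      have hp : [' ', ' '].isPrefixOf (c :: t) = false := by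
        cases t with
        | nil => simp [List.isPrefixOf]
        | cons b r =>
          have key : ¬ (' ' = c ∧ ' ' = b) := fun ⟨h1, h2⟩ => hne r h1.symm (by rw [← h2])
          simp only [List.isPrefixOf, List.isPrefixOf_nil_left, Bool.and_true,
            Bool.and_eq_false_iff, beq_eq_false_iff_ne, ne_eq]
          tauto
      simp only [hp, Bool.false_eq_true, if_false]
      rw [ih f _ (by simp at hf; omega), pvRepl_cons c t hp]
      simp
  | case3 =>
    intro fuel acc hf
    match fuel with
    | 0 => rw [PySem.Chars.replace.go]; simp [pvRepl]
    | f + 1 => rw [PySem.Chars.replace.go]; simp [pvRepl]; omega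

theorem pvRepl_eq (l : List Char) : PySem.Chars.replace l [' ', ' '] [' ', '\u00A0'] = pvRepl l := by
  rw [PySem.Chars.replace]
  simp only [List.isEmpty_cons, Bool.false_eq_true, if_false]
  exact (pvRepl_go l l.length [] le_rfl).trans (by simp)

def pvNoDbl : List Char → Bool
  | ' ' :: ' ' :: _ => false
  | _ :: t => pvNoDbl t
  | [] => true

theorem pvNoDbl_cons (c : Char) (t : List Char)
    (h : ¬ (c = ' ' ∧ t.head? = some ' ')) : pvNoDbl (c :: t) = pvNoDbl t := by
  rw [pvNoDbl.eq_def]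
  split
  · rename_i heq
    cases heq
    exact absurd ⟨rfl, rfl⟩ h
  · rename_i heq
    cases heq
    rfl
  · rename_i heq; cases heq

theorem pvRepl_head (l : List Char) : (pvRepl l).head? = l.head? := by
  rw [pvRepl.eq_def]
  split <;> rfl

theorem pvRepl_noDbl (l : List Char) : pvNoDbl (pvRepl l) = true := by
  induction l using pvRepl.induct with
  | case1 t ih =>
    show pvNoDbl (' ' :: '\u00A0' :: pvRepl t) = true
    rw [pvNoDbl_cons ' ' _ (by simp), pvNoDbl_cons '\u00A0' _ (by simp)]
    exact ih
  | case2 c t hne ih =>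
    have hp : [' ', ' '].isPrefixOf (c :: t) = false := by
      cases t with
      | nil => simp [List.isPrefixOf]
      | cons b r =>
        have key : ¬ (' ' = c ∧ ' ' = b) := fun ⟨h1, h2⟩ => hne r h1.symm (by rw [← h2])
        simp only [List.isPrefixOf, Bool.and_true, Bool.and_eq_false_iff,
          beq_eq_false_iff_ne, ne_eq]
        tauto
    rw [pvRepl_cons c t hp, pvNoDbl_cons c _ ?_]
    · exact ih
    · rintro ⟨hc, hh⟩
      subst hc
      rw [pvRepl_head t] at hh
      cases t with
      | nil => simp at hh
      | cons b r =>
        simp at hh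
        exact hne r rfl (by rw [hh])
  | case3 => rfl

theorem pvNoDbl_not_infix (l : List Char) (h : pvNoDbl l = true) : ¬ [' ', ' '] <:+: l := by
  rintro ⟨u, v, huv⟩
  subst huv
  induction u with
  | nil => simp [pvNoDbl] at h
  | cons a u ih =>
    apply ih
    rw [List.cons_append, pvNoDbl.eq_def] at h
    split at h
    · exact absurd h (by simp)
    · rename_i heq
      cases heq
      exact h
    · rename_i heq; cases heq

theorem pvRepl_id (l : List Char) (h : ¬ [' ', ' '] <:+: l) : pvRepl l = l := by
  induction l using pvRepl.induct with
  | case1 t ih => exact absurd ⟨[], t, rfl⟩ h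
  | case2 c t hne ih =>
    have hp : [' ', ' '].isPrefixOf (c :: t) = false := by
      cases t with
      | nil => simp [List.isPrefixOf]
      | cons b r =>
        have key : ¬ (' ' = c ∧ ' ' = b) := fun ⟨h1, h2⟩ => hne r h1.symm (by rw [← h2])
        simp only [List.isPrefixOf, Bool.and_true, Bool.and_eq_false_iff,
          beq_eq_false_iff_ne, ne_eq]
        tauto
    rw [pvRepl_cons c t hp, ih (fun ⟨u, v, huv⟩ => h ⟨c :: u, v, by rw [← huv]; rfl⟩)]
  | case3 => rfl

theorem pvRepl_not_isIn (l : List Char) :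
    PySem.Chars.isIn [' ', ' '] (pvRepl l) = false :=
  (PySem.Chars.isIn_eq_false_iff _ _).mpr (pvNoDbl_not_infix _ (pvRepl_noDbl l))

theorem tgA_while_eq (line : String) :
    (tgA_while (line.toList.length + 1) line).toList = pvRepl line.toList := by
  have hrep : (PySem.Str.replace line "  " " \u00A0").toList = pvRepl line.toList := by
    rw [PySem.Str.toList_replace]
    exact pvRepl_eq line.toList
  by_cases h : PySem.Str.isIn "  " line = true
  · have hinf : [' ', ' '] <:+: line.toList := by
      have := PySem.Str.isIn_eq "  " line
      rw [h] at this
      exact (PySem.Chars.isIn_iff_infix _ _).mp this.symm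
    obtain ⟨u, v, huv⟩ := hinf
    have hlen : 2 ≤ line.toList.length := by
      rw [← huv]; simp; omega
    obtain ⟨k, hk⟩ : ∃ k, line.toList.length = k + 2 := ⟨line.toList.length - 2, by omega⟩
    rw [hk]
    show (tgA_while (k + 2 + 1) line).toList = pvRepl line.toList
    rw [tgA_while, if_pos h]
    have h2 : PySem.Str.isIn "  " (PySem.Str.replace line "  " " \u00A0") = false := by
      rw [PySem.Str.isIn_eq]
      show PySem.Chars.isIn [' ', ' '] _ = false
      rw [hrep]
      exact pvRepl_not_isIn line.toList
    rw [tgA_while, if_neg (by rw [h2]; simp)]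
    exact hrep
  · have hni : PySem.Chars.isIn [' ', ' '] line.toList = false := by
      have heq := PySem.Str.isIn_eq "  " line
      have h' : PySem.Str.isIn "  " line = false := Bool.eq_false_iff.mpr h
      rw [heq] at h'
      exact h'
    rw [tgA_while, if_neg h,
      pvRepl_id line.toList ((PySem.Chars.isIn_eq_false_iff _ _).mp hni)]

def pvSplit : List Char → List (List Char)
  | [] => [[]]
  | '\n' :: t => [] :: pvSplit t
  | c :: t =>
    match pvSplit t with
    | h :: r => (c :: h) :: r
    | [] => [[c]]

theorem pvSplit_ne_nil (l : List Char) : pvSplit l ≠ [] := by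
  induction l using pvSplit.induct with
  | case1 => simp [pvSplit]
  | case2 t ih => simp [pvSplit]
  | case3 c t hne h r hm =>
    rw [pvSplit.eq_def]
    split
    · simp
    · simp
    · rename_i heq
      cases heq
      simp [hm]
  | case4 c t hne hm ih => exact absurd hm ih

theorem pvSplit_cons (c : Char) (t : List Char) (hc : ¬ c = '\n') (h : List Char)
    (r : List (List Char)) (hm : pvSplit t = h :: r) : pvSplit (c :: t) = (c :: h) :: r := by
  rw [pvSplit.eq_def]
  split
  · rename_i heq; cases heq
  · rename_i heq
    cases heq
    exact absurd rfl hc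
  · rename_i heq
    cases heq
    rw [hm]

theorem pvSplit_head (t : List Char) (h : List Char) (r : List (List Char))
    (hm : pvSplit t = h :: r) : h.head? = t.head? ∨ (h = [] ∧ t.head? = some '\n') := by
  cases t with
  | nil => rw [pvSplit.eq_def] at hm; cases hm; simp
  | cons c t' =>
    by_cases hc : c = '\n'
    · subst hc
      rw [pvSplit.eq_def] at hm
      simp at hm
      right; exact ⟨hm.1, rfl⟩
    · obtain ⟨h', r', hm'⟩ := List.exists_cons_of_ne_nil (pvSplit_ne_nil t')
      rw [pvSplit_cons c t' hc h' r' hm'] at hm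
      cases hm
      left; simp

theorem pvSplit_go (l : List Char) : ∀ (fuel : Nat) (cur : List Char) (acc : List (List Char)), l.length ≤ fuel →
    PySem.Chars.splitOn.go ['\n'] fuel l cur acc =
      acc.reverse ++ (match pvSplit l with
        | h :: r => (cur.reverse ++ h) :: r
        | [] => [cur.reverse]) := by
  induction l with
  | nil =>
    intro fuel cur acc hf
    match fuel with
    | 0 => rw [PySem.Chars.splitOn.go]; simp [pvSplit]
    | f + 1 => rw [PySem.Chars.splitOn.go]; simp [pvSplit]; omega
  | cons c t ih =>
    intro fuel cur acc hf
    match fuel with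
    | f + 1 =>
      rw [PySem.Chars.splitOn.go]
      by_cases hc : c = '\n'
      · subst hc
        have hp : ['\n'].isPrefixOf ('\n' :: t) = true := by simp [List.isPrefixOf]
        simp only [hp, if_true]
        have hd : List.drop ['\n'].length ('\n' :: t) = t := rfl
        rw [hd, ih f [] (cur.reverse :: acc) (by simp at hf; omega)]
        have hnl : pvSplit ('\n' :: t) = [] :: pvSplit t := rfl
        rw [hnl]
        obtain ⟨h', r', hm'⟩ := List.exists_cons_of_ne_nil (pvSplit_ne_nil t)
        rw [hm']
        simp
      · have hp : ['\n'].isPrefixOf (c :: t) = false := by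
          simp only [List.isPrefixOf, Bool.and_true, beq_eq_false_iff_ne, ne_eq]
          exact fun hh => hc hh.symm
        simp only [hp, Bool.false_eq_true, if_false]
        rw [ih f (c :: cur) acc (by simp at hf; omega)]
        obtain ⟨h', r', hm'⟩ := List.exists_cons_of_ne_nil (pvSplit_ne_nil t)
        rw [hm', pvSplit_cons c t hc h' r' hm']
        simp

theorem pvSplit_eq (l : List Char) : PySem.Chars.splitOn l ['\n'] = pvSplit l := by
  rw [PySem.Chars.splitOn, pvSplit_go l (l.length + 1) [] [] (by omega)]
  obtain ⟨h', r', hm'⟩ := List.exists_cons_of_ne_nil (pvSplit_ne_nil l)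
  rw [hm']
  simp

theorem pvPrefix_false (c : Char) (h : List Char)
    (hch : ¬ (c = ' ' ∧ h.head? = some ' ')) : [' ', ' '].isPrefixOf (c :: h) = false := by
  cases h with
  | nil => simp [List.isPrefixOf]
  | cons b r =>
    simp only [List.head?_cons, Option.some.injEq] at hch
    simp only [List.isPrefixOf, Bool.and_true, Bool.and_eq_false_iff,
      beq_eq_false_iff_ne, ne_eq]
    by_cases hc : c = ' '
    · by_cases hb : b = ' '
      · exact absurd ⟨hc, hb⟩ hch
      · right; exact fun hh => hb hh.symm
    · left; exact fun hh => hc hh.symm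

theorem pvInter_cons_append (sep x y : List Char) (xs : List (List Char)) :
    sep.intercalate ((x ++ y) :: xs) = x ++ sep.intercalate (y :: xs) := by
  cases xs with
  | nil => simp [List.intercalate]
  | cons z zs => simp [List.intercalate, List.intersperse]

theorem pvInter_nil_cons (sep y : List Char) (ys : List (List Char)) :
    sep.intercalate ([] :: y :: ys) = sep ++ sep.intercalate (y :: ys) := by
  simp [List.intercalate, List.intersperse]

theorem pvJoin_map_repl (l : List Char) :
    PySem.Chars.join ['\n'] ((pvSplit l).map pvRepl) = pvRepl l := by
  induction l using pvRepl.induct with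
  | case1 t ih =>
    obtain ⟨h, r, hm⟩ := List.exists_cons_of_ne_nil (pvSplit_ne_nil t)
    have h1 : pvSplit (' ' :: t) = (' ' :: h) :: r := pvSplit_cons _ _ (by decide) _ _ hm
    have h2 : pvSplit (' ' :: ' ' :: t) = (' ' :: ' ' :: h) :: r :=
      pvSplit_cons _ _ (by decide) _ _ h1
    rw [h2]
    show PySem.Chars.join ['\n'] (pvRepl (' ' :: ' ' :: h) :: (r.map pvRepl)) = _
    have h3 : pvRepl (' ' :: ' ' :: h) = [' ', '\u00A0'] ++ pvRepl h := rfl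
    rw [PySem.Chars.join, h3, pvInter_cons_append]
    have h4 : ['\n'].intercalate (pvRepl h :: (r.map pvRepl)) = pvRepl t := by
      rw [show (pvRepl h :: (r.map pvRepl)) = ((pvSplit t).map pvRepl) by rw [hm]; rfl]
      exact ih
    rw [h4]
    rfl
  | case2 c t hne ih =>
    by_cases hc : c = '\n'
    · subst hc
      have h1 : pvSplit ('\n' :: t) = [] :: pvSplit t := rfl
      rw [h1]
      obtain ⟨h, r, hm⟩ := List.exists_cons_of_ne_nil (pvSplit_ne_nil t)
      rw [hm]
      show PySem.Chars.join ['\n'] ([] :: pvRepl h :: (r.map pvRepl)) = _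
      rw [PySem.Chars.join, pvInter_nil_cons]
      have h4 : ['\n'].intercalate (pvRepl h :: (r.map pvRepl)) = pvRepl t := by
        rw [show (pvRepl h :: (r.map pvRepl)) = ((pvSplit t).map pvRepl) by rw [hm]; rfl]
        exact ih
      rw [h4]
      rfl
    · obtain ⟨h, r, hm⟩ := List.exists_cons_of_ne_nil (pvSplit_ne_nil t)
      have h1 : pvSplit (c :: t) = (c :: h) :: r := pvSplit_cons _ _ hc _ _ hm
      rw [h1]
      have hth : ¬ (c = ' ' ∧ t.head? = some ' ') := by
        rintro ⟨hc', hh⟩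
        cases t with
        | nil => simp at hh
        | cons b t' => simp at hh; exact hne t' hc' (by rw [hh])
      have hhh : ¬ (c = ' ' ∧ h.head? = some ' ') := by
        rintro ⟨hc', hh⟩
        rcases pvSplit_head t h r hm with heq | ⟨hnil, _⟩
        · exact hth ⟨hc', by rw [← heq]; exact hh⟩
        · rw [hnil] at hh; simp at hh
      have h2 : pvRepl (c :: h) = [c] ++ pvRepl h := pvRepl_cons _ _ (pvPrefix_false _ _ hhh)
      show PySem.Chars.join ['\n'] (pvRepl (c :: h) :: (r.map pvRepl)) = _
      rw [PySem.Chars.join, h2, pvInter_cons_append]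
      have h4 : ['\n'].intercalate (pvRepl h :: (r.map pvRepl)) = pvRepl t := by
        rw [show (pvRepl h :: (r.map pvRepl)) = ((pvSplit t).map pvRepl) by rw [hm]; rfl]
        exact ih
      rw [h4, pvRepl_cons _ _ (pvPrefix_false _ _ hth)]
      rfl
  | case3 => rfl

theorem pvRepl_run (n : Nat) (rest : List Char) (h : rest.head? ≠ some ' ') :
    pvRepl (List.replicate n ' ' ++ rest) =
      (List.replicate (n / 2) [' ', '\u00A0']).flatten ++ List.replicate (n % 2) ' ' ++ pvRepl rest := by
  induction n using Nat.strong_induction_on with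
  | _ n ihn =>
    match n with
    | 0 => simp
    | 1 =>
      show pvRepl (' ' :: rest) = _
      rw [pvRepl_cons ' ' rest (pvPrefix_false _ _ (by simp [h]))]
      rfl
    | k + 2 =>
      have hsh : List.replicate (k + 2) ' ' ++ rest = ' ' :: ' ' :: (List.replicate k ' ' ++ rest) := by
        simp [List.replicate_succ]
      rw [hsh]
      show ' ' :: '\u00A0' :: pvRepl (List.replicate k ' ' ++ rest) = _
      rw [ihn k (by omega)]
      have hdiv : (k + 2) / 2 = k / 2 + 1 := by omega
      have hmod : (k + 2) % 2 = k % 2 := by omega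
      rw [hdiv, hmod, List.replicate_succ, List.flatten_cons]
      simp

theorem tgB_go_eq_aux (n : Nat) : ∀ l : List Char, l.length ≤ n → tgB_go l = pvRepl l := by
  induction n with
  | zero =>
    intro l hl
    rw [List.length_eq_zero_iff.mp (Nat.le_zero.mp hl), tgB_go]
    rfl
  | succ k ih =>
    intro l hl
    match l with
    | [] => rw [tgB_go]; rfl
    | c :: t =>
      rw [tgB_go]
      by_cases hc : c = ' '
      · subst hc
        rw [dif_pos rfl]
        set m := ((' ' :: t).takeWhile (fun x => x == ' ')).length with hm
        set rest := (' ' :: t).dropWhile (fun x => x == ' ') with hr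
        have hall : ∀ b ∈ (' ' :: t).takeWhile (fun x => x == ' '), b = ' ' := fun b hb => by
          simpa using List.mem_takeWhile_imp hb
        have hrep : (' ' :: t).takeWhile (fun x => x == ' ') = List.replicate m ' ' := by
          rw [hm]
          exact List.eq_replicate_length.mpr hall
        have hsh : ' ' :: t = List.replicate m ' ' ++ rest := by
          conv_lhs => rw [← List.takeWhile_append_dropWhile (p := fun x : Char => x == ' ') (l := ' ' :: t)]
          rw [hrep]
        have hrest : rest.head? ≠ some ' ' := by
          cases hrd : rest with
          | nil => simp
          | cons b r =>
            have := List.head?_dropWhile_not (p := fun x : Char => x == ' ') (l := ' ' :: t)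
            rw [← hr, hrd] at this
            simpa using this
        have hrlen : rest.length ≤ k := by
          have h1 : rest.length ≤ t.length := by
            rw [hr, List.dropWhile_cons]
            simp only [beq_self_eq_true, if_true]
            exact List.length_dropWhile_le _ _
          simp only [List.length_cons] at hl
          omega
        conv_rhs => rw [hsh, pvRepl_run m rest hrest]
        rw [ih rest hrlen]
      · rw [dif_neg hc, pvRepl_cons c t (pvPrefix_false _ _ ?_), ih t (by simp at hl; omega)]
        rintro ⟨hc', _⟩; exact hc hc'

theorem tgB_go_eq (l : List Char) : tgB_go l = pvRepl l := tgB_go_eq_aux l.length l le_rfl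

theorem pvMain (s : String) :
    PySem.Str.join "\n" (((PySem.Str.split? s "\n").getD []).foldl
      (fun acc line => acc ++ [tgA_while (line.toList.length + 1) line]) []) =
    String.ofList (tgB_go s.toList) := by
  have hsplit : PySem.Str.split? s "\n" = some ((pvSplit s.toList).map String.ofList) := by
    rw [PySem.Str.split?, PySem.Chars.split?]
    have : ("\n" : String).toList.isEmpty = false := rfl
    rw [this]
    simp only [Bool.false_eq_true, if_false, Option.map_some]
    rw [show ("\n" : String).toList = ['\n'] from rfl, pvSplit_eq]
  rw [hsplit]
  simp only [Option.getD_some]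
  rw [PySem.List.foldl_append_singleton_eq_map, List.nil_append]
  apply String.toList_inj.mp
  rw [PySem.Str.toList_join, tgB_go_eq, String.toList_ofList]
  have hcomp : List.map String.toList
      (List.map (fun line => tgA_while (line.toList.length + 1) line)
        (List.map String.ofList (pvSplit s.toList))) = List.map pvRepl (pvSplit s.toList) := by
    rw [List.map_map, List.map_map]
    apply List.map_congr_left
    intro seg _
    show (tgA_while ((String.ofList seg).toList.length + 1) (String.ofList seg)).toList = pvRepl seg
    rw [tgA_while_eq, String.toList_ofList]
  rw [hcomp]
  exact (pvJoin_map_repl s.toList).trans String.toList_ofList.symm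

-- ===== VERDICT (by name: the statement is the Claim_ definition above) =====
theorem tg_plain_preserve_spaces_py_spec : Claim_equal_tg_plain_preserve_spaces_py := by
  intro plain _
  show tg_plain_preserve_spaces_py plain = tg_plain_preserve_spaces_py_alt plain
  unfold tg_plain_preserve_spaces_py tg_plain_preserve_spaces_py_alt
  exact pvMain _
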